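-- pv_equiv track=rewrite | github.com/haukelicht/group_mention_detection | code/utils/evaluation.py | correct_iob2
-- ===== SOURCE A (Python) =====
-- from typing import List, Dict, Optional, Tuple, Union, Literal
--
-- def correct_iob2(labels: List[str]) -> List[str]:
--     prev = None
--     edit = list()
--     for i, l in enumerate(labels):
--         if (i == 0 or prev == 'O') and l[0] == 'I':
--             edit.append(i)
--         prev = l
--     if len(edit) > 0:
--         labels = [l.replace('I-', 'B-') if i in edit else l for i, l in enumerate(labels)]
--     return labels
-- ===== SOURCE B (Python) =====
-- def correct_iob2(labels):
--     result = []
--     prev = None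
--     for i, l in enumerate(labels):
--         if (i == 0 or prev == 'O') and l[0] == 'I':
--             result.append(l.replace('I-', 'B-'))
--         else:
--             result.append(l)
--         prev = l
--     return result
-- ===== Notes on version B (the rewrite author's own statement) =====
-- stated objective: simpler
-- what changed: A first collects a list of edit indices and then rebuilds the list with an 'i in edit' linear membership test per element; B fuses this into one direct pass that appends the corrected or original label immediately, eliminating the index list and its membership scans.
import Mathlib
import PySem

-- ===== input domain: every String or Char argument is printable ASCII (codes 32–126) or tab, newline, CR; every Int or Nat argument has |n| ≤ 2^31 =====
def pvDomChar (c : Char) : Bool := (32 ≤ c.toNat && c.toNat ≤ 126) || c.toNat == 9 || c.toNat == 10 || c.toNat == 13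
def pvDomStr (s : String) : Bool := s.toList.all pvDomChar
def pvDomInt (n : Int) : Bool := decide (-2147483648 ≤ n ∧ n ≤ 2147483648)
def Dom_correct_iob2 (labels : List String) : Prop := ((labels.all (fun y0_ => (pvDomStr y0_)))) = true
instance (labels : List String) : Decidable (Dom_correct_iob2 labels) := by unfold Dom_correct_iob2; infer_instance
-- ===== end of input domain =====

-- B fuses A's two passes (collect edit indices, then rebuild with a membership test)
-- into one direct pass; equivalence of the return values is proved below.


-- the guard `(i == 0 or prev == 'O') and l[0] == 'I'`, shared verbatim by both Pythons
def pvCond (prev : Option String) (i : Int) (l : String) : Bool :=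
  (i == 0 || prev == some "O") && (PySem.Str.pyGet? l 0 == some 'I')

-- ===== PORT A =====
-- A's for-loop: state (prev, edit), index carried explicitly (enumerate)
def pvALoop : Option String → List Int → Int → List String → List Int
  | _, edit, _, [] => edit
  | prev, edit, i, l :: rest =>
      pvALoop (some l) (if pvCond prev i l then edit ++ [i] else edit) (i + 1) rest

def correct_iob2 (labels : List String) : List String :=
  let edit := pvALoop none [] 0 labels
  if edit.length > 0 then
    (PySem.List.enumerate labels).map
      (fun p => if edit.contains p.1 then PySem.Str.replace p.2 "I-" "B-" else p.2)
  else labels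

-- ===== PORT B =====
-- B's single fused pass: append the corrected or original label immediately
def pvBLoop : Option String → Int → List String → List String
  | _, _, [] => []
  | prev, i, l :: rest =>
      (if pvCond prev i l then PySem.Str.replace l "I-" "B-" else l) :: pvBLoop (some l) (i + 1) rest

def correct_iob2_alt (labels : List String) : List String := pvBLoop none 0 labels

-- ===== PRECONDITION & SPEC =====
-- A (and B) raise IndexError via l[0] exactly on an empty-string label whose guard's left
-- conjunct fires: the first label, or any label directly preceded by 'O'.
def Pre_correct_iob2 (labels : List String) : Prop :=
  ∀ p ∈ ("O" :: labels).zip labels, p.1 = "O" → p.2 ≠ ""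
instance (labels : List String) : Decidable (Pre_correct_iob2 labels) := by
  unfold Pre_correct_iob2; infer_instance

def pvWitness_correct_iob2 : List String := ["I-g", "O", "I-g", "I-g", "B-g", ""]

def Spec_correct_iob2 (labels : List String) (out : List String) : Prop := out = correct_iob2_alt labels
instance (labels : List String) (out : List String) : Decidable (Spec_correct_iob2 labels out) := by unfold Spec_correct_iob2; infer_instance

-- ===== CLAIM (what is proved, stated in full; the proofs are below) =====
def Claim_equal_correct_iob2 : Prop := ∀ (labels : List String), Dom_correct_iob2 labels → Pre_correct_iob2 labels → Spec_correct_iob2 labels (correct_iob2 labels)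

-- ===== LEMMAS AND PROOFS =====

-- the edit list A builds, as a pure recursion
def pvEditOf : Option String → Int → List String → List Int
  | _, _, [] => []
  | prev, i, l :: rest => (if pvCond prev i l then [i] else []) ++ pvEditOf (some l) (i + 1) rest

theorem pvALoop_eq (rest : List String) : ∀ (prev : Option String) (edit : List Int) (i : Int),
    pvALoop prev edit i rest = edit ++ pvEditOf prev i rest := by
  induction rest with
  | nil => intro prev edit i; simp [pvALoop, pvEditOf]
  | cons l rest ih =>
      intro prev edit i
      by_cases h : pvCond prev i l = true <;>
        simp [pvALoop, pvEditOf, h, ih, List.append_assoc]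

theorem pvEditOf_lb (rest : List String) : ∀ (prev : Option String) (i j : Int),
    j ∈ pvEditOf prev i rest → i ≤ j := by
  induction rest with
  | nil => intro prev i j h; simp [pvEditOf] at h
  | cons l rest ih =>
      intro prev i j h
      by_cases hc : pvCond prev i l = true <;> simp [pvEditOf, hc] at h
      · rcases h with h | h
        · omega
        · have := ih (some l) (i + 1) j h; omega
      · have := ih (some l) (i + 1) j h; omega

theorem pvMap_eq (rest : List String) : ∀ (prev : Option String) (i : Int) (E : List Int),
    (∀ j, i ≤ j → (E.contains j = true ↔ j ∈ pvEditOf prev i rest)) →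
    (PySem.List.enumerate rest i).map
        (fun p => if E.contains p.1 then PySem.Str.replace p.2 "I-" "B-" else p.2)
      = pvBLoop prev i rest := by
  induction rest with
  | nil => intro prev i E _; simp [PySem.List.enumerate_nil, pvBLoop]
  | cons l rest ih =>
      intro prev i E hE
      have hhead : E.contains i = pvCond prev i l := by
        by_cases hc : pvCond prev i l = true
        · have : (i : Int) ∈ pvEditOf prev i (l :: rest) := by simp [pvEditOf, hc]
          rw [hc]; exact ((hE i le_rfl).mpr this)
        · simp only [eq_false_of_ne_true hc]
          by_contra hne
          have hcont : E.contains i = true := by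
            cases hx : E.contains i
            · exact absurd hx hne
            · rfl
          have hmem := (hE i le_rfl).mp hcont
          simp [pvEditOf, hc] at hmem
          have := pvEditOf_lb rest (some l) (i + 1) i hmem
          omega
      have htail : ∀ j, i + 1 ≤ j → (E.contains j = true ↔ j ∈ pvEditOf (some l) (i + 1) rest) := by
        intro j hj
        rw [hE j (by omega)]
        have hji : j ≠ i := by omega
        by_cases hc : pvCond prev i l = true <;> simp [pvEditOf, hc, hji]
      rw [PySem.List.enumerate_cons]
      simp only [List.map_cons, hhead, pvBLoop, ih (some l) (i + 1) E htail]

theorem pvBLoop_id (rest : List String) : ∀ (prev : Option String) (i : Int),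
    pvEditOf prev i rest = [] → pvBLoop prev i rest = rest := by
  induction rest with
  | nil => intro prev i _; rfl
  | cons l rest ih =>
      intro prev i h
      by_cases hc : pvCond prev i l = true
      · simp [pvEditOf, hc] at h
      · simp [pvEditOf, hc] at h
        simp [pvBLoop, hc, ih (some l) (i + 1) h]

-- ===== VERDICT (by name: the statement is the Claim_ definition above) =====
theorem correct_iob2_spec : Claim_equal_correct_iob2 := by
  intro labels _ _
  show correct_iob2 labels = correct_iob2_alt labels
  unfold correct_iob2 correct_iob2_alt
  rw [pvALoop_eq]
  simp only [List.nil_append]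
  by_cases h : (pvEditOf none 0 labels).length > 0
  · simp only [if_pos h]
    exact pvMap_eq labels none 0 (pvEditOf none 0 labels)
      (fun j _ => by simp)
  · simp only [if_neg h]
    have hnil : pvEditOf none 0 labels = [] := by
      cases hx : pvEditOf none 0 labels
      · rfl
      · rw [hx] at h; simp at h
    rw [pvBLoop_id labels none 0 hnil]
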